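-- pv_equiv track=rewrite | github.com/aymeam/User_distribution_experiments | Model1_Experiments/auxiliares.py | cv_sorted_data
-- ===== SOURCE A (Python) =====
-- def cv_sorted_data(x_text):
--     train_indexes = []
--     part0,part1,part2,part3,part4,part5,part6,part7,part8,part9 =[],[],[],[],[],[],[],[],[],[]
--     for i in range(len(x_text)):
--         if i >=0 and i <701:
--             part0.append(i)
--         elif i >=701 and i <1400:
--             part1.append(i)
--
--         elif i >=1400 and i <2102:
--             part2.append(i)
--
--         elif i >=2102 and i <2800:
--             part3.append(i)
--
--         elif i >=2800 and i <3500: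
--             part4.append(i)
--
--         elif i >=3500 and i <4200:
--             part5.append(i)
--
--         elif i >=4200 and i <4798:
--             part6.append(i)
--
--         elif i >=4798 and i <5597:
--             part7.append(i)
--
--         elif i >=5597 and i <6301:
--             part8.append(i)
--
--         elif i >=6301 and i <7006:
--             part9.append(i)
--     train_indexes.append(part0)
--     train_indexes.append(part1)
--     train_indexes.append(part2)
--     train_indexes.append(part3)
--     train_indexes.append(part4)
--     train_indexes.append(part5)
--     train_indexes.append(part6)
--     train_indexes.append(part7)
--     train_indexes.append(part8)
--     train_indexes.append(part9)
--     return train_indexes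
-- ===== SOURCE B (Python) =====
-- def cv_sorted_data(x_text):
--     bounds = [0, 701, 1400, 2102, 2800, 3500, 4200, 4798, 5597, 6301, 7006]
--     n = len(x_text)
--     return [list(range(bounds[k], min(bounds[k + 1], n))) for k in range(10)]
-- ===== Notes on version B (the rewrite author's own statement) =====
-- stated objective: simpler
-- what changed: Replaces the per-index scan with a chained if/elif over ten hard-coded intervals by a boundary table: each bucket is emitted directly as range(bounds[k], min(bounds[k+1], n)), so the element-wise branching disappears.
import Mathlib
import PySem

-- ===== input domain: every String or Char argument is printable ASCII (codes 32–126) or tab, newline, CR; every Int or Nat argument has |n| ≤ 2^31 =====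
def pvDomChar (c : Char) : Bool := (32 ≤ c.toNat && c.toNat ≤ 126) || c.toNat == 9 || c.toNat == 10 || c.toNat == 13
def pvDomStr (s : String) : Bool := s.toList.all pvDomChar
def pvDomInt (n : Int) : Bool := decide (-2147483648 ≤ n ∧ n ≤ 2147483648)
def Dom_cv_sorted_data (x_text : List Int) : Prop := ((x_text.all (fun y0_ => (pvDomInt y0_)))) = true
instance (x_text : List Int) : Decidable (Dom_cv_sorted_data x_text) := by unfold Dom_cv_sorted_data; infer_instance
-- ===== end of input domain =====

-- ===== PORT A =====
-- B is simpler: it builds each bucket directly from a boundary table instead of branching per index.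
abbrev pvSt : Type := List Int × List Int × List Int × List Int × List Int × List Int × List Int × List Int × List Int × List Int

def pvStep (s : pvSt) (i : Int) : pvSt :=
  if 0 ≤ i ∧ i < 701 then (s.1 ++ [i], s.2.1, s.2.2.1, s.2.2.2.1, s.2.2.2.2.1, s.2.2.2.2.2.1, s.2.2.2.2.2.2.1, s.2.2.2.2.2.2.2.1, s.2.2.2.2.2.2.2.2.1, s.2.2.2.2.2.2.2.2.2)
  else   if 701 ≤ i ∧ i < 1400 then (s.1, s.2.1 ++ [i], s.2.2.1, s.2.2.2.1, s.2.2.2.2.1, s.2.2.2.2.2.1, s.2.2.2.2.2.2.1, s.2.2.2.2.2.2.2.1, s.2.2.2.2.2.2.2.2.1, s.2.2.2.2.2.2.2.2.2)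
  else   if 1400 ≤ i ∧ i < 2102 then (s.1, s.2.1, s.2.2.1 ++ [i], s.2.2.2.1, s.2.2.2.2.1, s.2.2.2.2.2.1, s.2.2.2.2.2.2.1, s.2.2.2.2.2.2.2.1, s.2.2.2.2.2.2.2.2.1, s.2.2.2.2.2.2.2.2.2)
  else   if 2102 ≤ i ∧ i < 2800 then (s.1, s.2.1, s.2.2.1, s.2.2.2.1 ++ [i], s.2.2.2.2.1, s.2.2.2.2.2.1, s.2.2.2.2.2.2.1, s.2.2.2.2.2.2.2.1, s.2.2.2.2.2.2.2.2.1, s.2.2.2.2.2.2.2.2.2)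
  else   if 2800 ≤ i ∧ i < 3500 then (s.1, s.2.1, s.2.2.1, s.2.2.2.1, s.2.2.2.2.1 ++ [i], s.2.2.2.2.2.1, s.2.2.2.2.2.2.1, s.2.2.2.2.2.2.2.1, s.2.2.2.2.2.2.2.2.1, s.2.2.2.2.2.2.2.2.2)
  else   if 3500 ≤ i ∧ i < 4200 then (s.1, s.2.1, s.2.2.1, s.2.2.2.1, s.2.2.2.2.1, s.2.2.2.2.2.1 ++ [i], s.2.2.2.2.2.2.1, s.2.2.2.2.2.2.2.1, s.2.2.2.2.2.2.2.2.1, s.2.2.2.2.2.2.2.2.2)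
  else   if 4200 ≤ i ∧ i < 4798 then (s.1, s.2.1, s.2.2.1, s.2.2.2.1, s.2.2.2.2.1, s.2.2.2.2.2.1, s.2.2.2.2.2.2.1 ++ [i], s.2.2.2.2.2.2.2.1, s.2.2.2.2.2.2.2.2.1, s.2.2.2.2.2.2.2.2.2)
  else   if 4798 ≤ i ∧ i < 5597 then (s.1, s.2.1, s.2.2.1, s.2.2.2.1, s.2.2.2.2.1, s.2.2.2.2.2.1, s.2.2.2.2.2.2.1, s.2.2.2.2.2.2.2.1 ++ [i], s.2.2.2.2.2.2.2.2.1, s.2.2.2.2.2.2.2.2.2)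
  else   if 5597 ≤ i ∧ i < 6301 then (s.1, s.2.1, s.2.2.1, s.2.2.2.1, s.2.2.2.2.1, s.2.2.2.2.2.1, s.2.2.2.2.2.2.1, s.2.2.2.2.2.2.2.1, s.2.2.2.2.2.2.2.2.1 ++ [i], s.2.2.2.2.2.2.2.2.2)
  else   if 6301 ≤ i ∧ i < 7006 then (s.1, s.2.1, s.2.2.1, s.2.2.2.1, s.2.2.2.2.1, s.2.2.2.2.2.1, s.2.2.2.2.2.2.1, s.2.2.2.2.2.2.2.1, s.2.2.2.2.2.2.2.2.1, s.2.2.2.2.2.2.2.2.2 ++ [i])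
  else s

def cv_sorted_data (x_text : List Int) : List (List Int) :=
  let s := (PySem.List.pyRange 0 (x_text.length : Int) 1).foldl pvStep
      (([], [], [], [], [], [], [], [], [], []) : pvSt)
  [s.1, s.2.1, s.2.2.1, s.2.2.2.1, s.2.2.2.2.1, s.2.2.2.2.2.1, s.2.2.2.2.2.2.1, s.2.2.2.2.2.2.2.1, s.2.2.2.2.2.2.2.2.1, s.2.2.2.2.2.2.2.2.2]

-- ===== PORT B =====
def pvBounds : List Int := [0, 701, 1400, 2102, 2800, 3500, 4200, 4798, 5597, 6301, 7006]

def cv_sorted_data_alt (x_text : List Int) : List (List Int) :=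
  let n : Int := x_text.length
  (PySem.List.pyRange 0 10 1).map (fun k =>
    PySem.List.pyRange (PySem.List.pyGetD pvBounds k 0)
      (min (PySem.List.pyGetD pvBounds (k + 1) 0) n) 1)

-- ===== PRECONDITION & SPEC =====
def Spec_cv_sorted_data (x_text : List Int) (out : List (List Int)) : Prop := out = cv_sorted_data_alt x_text
instance (x_text : List Int) (out : List (List Int)) : Decidable (Spec_cv_sorted_data x_text out) := by unfold Spec_cv_sorted_data; infer_instance

-- ===== CLAIM (what is proved, stated in full; the proofs are below) =====
def Claim_equal_cv_sorted_data : Prop := ∀ (x_text : List Int), Dom_cv_sorted_data x_text → Spec_cv_sorted_data x_text (cv_sorted_data x_text)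

-- ===== LEMMAS AND PROOFS =====

-- bucket of indices lo ≤ i < min hi n
def pvBk (lo hi : Int) (n : Nat) : List Int := PySem.List.pyRange lo (min hi (n : Int)) 1

theorem pvBk_zero (lo hi : Int) (h0 : 0 ≤ lo) : pvBk lo hi 0 = [] := by
  unfold pvBk
  exact PySem.List.pyRange_one_eq_nil (by omega)

theorem pvBk_succ (lo hi : Int) (n : Nat) :
    pvBk lo hi (n + 1) =
      if lo ≤ (n : Int) ∧ (n : Int) < hi then pvBk lo hi n ++ [(n : Int)] else pvBk lo hi n := by
  unfold pvBk
  split_ifs with h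
  · have h1 : min hi ((n : Int) + 1) = (n : Int) + 1 := by omega
    have h2 : min hi (n : Int) = (n : Int) := by omega
    push_cast
    rw [h1, h2]
    exact PySem.List.pyRange_one_succ_right h.1
  · rcases lt_or_ge (n : Int) lo with hlt | hge
    · rw [PySem.List.pyRange_one_eq_nil (by push_cast; omega),
          PySem.List.pyRange_one_eq_nil (by omega)]
    · have hhi : hi ≤ (n : Int) := by omega
      have h1 : min hi ((n : Int) + 1) = hi := by omega
      have h2 : min hi (n : Int) = hi := by omega
      push_cast
      rw [h1, h2]

theorem pvStep_eq (b0 b1 b2 b3 b4 b5 b6 b7 b8 b9 : List Int) (i : Int) :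
    pvStep (b0, b1, b2, b3, b4, b5, b6, b7, b8, b9) i = (if (0 ≤ i ∧ i < 701) then b0 ++ [i] else b0, if (701 ≤ i ∧ i < 1400) then b1 ++ [i] else b1, if (1400 ≤ i ∧ i < 2102) then b2 ++ [i] else b2, if (2102 ≤ i ∧ i < 2800) then b3 ++ [i] else b3, if (2800 ≤ i ∧ i < 3500) then b4 ++ [i] else b4, if (3500 ≤ i ∧ i < 4200) then b5 ++ [i] else b5, if (4200 ≤ i ∧ i < 4798) then b6 ++ [i] else b6, if (4798 ≤ i ∧ i < 5597) then b7 ++ [i] else b7, if (5597 ≤ i ∧ i < 6301) then b8 ++ [i] else b8, if (6301 ≤ i ∧ i < 7006) then b9 ++ [i] else b9) := by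
  have hreg : i < 0 ∨ (0 ≤ i ∧ i < 701) ∨ (701 ≤ i ∧ i < 1400) ∨ (1400 ≤ i ∧ i < 2102) ∨ (2102 ≤ i ∧ i < 2800) ∨ (2800 ≤ i ∧ i < 3500) ∨ (3500 ≤ i ∧ i < 4200) ∨ (4200 ≤ i ∧ i < 4798) ∨ (4798 ≤ i ∧ i < 5597) ∨ (5597 ≤ i ∧ i < 6301) ∨ (6301 ≤ i ∧ i < 7006) ∨ 7006 ≤ i := by omega
  rcases hreg with h | h | h | h | h | h | h | h | h | h | h | h
  · simp only [pvStep]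
    rw [if_neg (show ¬(0 ≤ i ∧ i < 701) by omega),
        if_neg (show ¬(701 ≤ i ∧ i < 1400) by omega),
        if_neg (show ¬(1400 ≤ i ∧ i < 2102) by omega),
        if_neg (show ¬(2102 ≤ i ∧ i < 2800) by omega),
        if_neg (show ¬(2800 ≤ i ∧ i < 3500) by omega),
        if_neg (show ¬(3500 ≤ i ∧ i < 4200) by omega),
        if_neg (show ¬(4200 ≤ i ∧ i < 4798) by omega),
        if_neg (show ¬(4798 ≤ i ∧ i < 5597) by omega),
        if_neg (show ¬(5597 ≤ i ∧ i < 6301) by omega),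
        if_neg (show ¬(6301 ≤ i ∧ i < 7006) by omega),
        if_neg (show ¬(0 ≤ i ∧ i < 701) by omega),
        if_neg (show ¬(701 ≤ i ∧ i < 1400) by omega),
        if_neg (show ¬(1400 ≤ i ∧ i < 2102) by omega),
        if_neg (show ¬(2102 ≤ i ∧ i < 2800) by omega),
        if_neg (show ¬(2800 ≤ i ∧ i < 3500) by omega),
        if_neg (show ¬(3500 ≤ i ∧ i < 4200) by omega),
        if_neg (show ¬(4200 ≤ i ∧ i < 4798) by omega),
        if_neg (show ¬(4798 ≤ i ∧ i < 5597) by omega),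
        if_neg (show ¬(5597 ≤ i ∧ i < 6301) by omega),
        if_neg (show ¬(6301 ≤ i ∧ i < 7006) by omega)]
  · simp only [pvStep]
    rw [if_pos (show (0 ≤ i ∧ i < 701) by omega),
        if_pos (show (0 ≤ i ∧ i < 701) by omega),
        if_neg (show ¬(701 ≤ i ∧ i < 1400) by omega),
        if_neg (show ¬(1400 ≤ i ∧ i < 2102) by omega),
        if_neg (show ¬(2102 ≤ i ∧ i < 2800) by omega),
        if_neg (show ¬(2800 ≤ i ∧ i < 3500) by omega),
        if_neg (show ¬(3500 ≤ i ∧ i < 4200) by omega),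
        if_neg (show ¬(4200 ≤ i ∧ i < 4798) by omega),
        if_neg (show ¬(4798 ≤ i ∧ i < 5597) by omega),
        if_neg (show ¬(5597 ≤ i ∧ i < 6301) by omega),
        if_neg (show ¬(6301 ≤ i ∧ i < 7006) by omega)]
  · simp only [pvStep]
    rw [if_neg (show ¬(0 ≤ i ∧ i < 701) by omega),
        if_pos (show (701 ≤ i ∧ i < 1400) by omega),
        if_neg (show ¬(0 ≤ i ∧ i < 701) by omega),
        if_pos (show (701 ≤ i ∧ i < 1400) by omega),
        if_neg (show ¬(1400 ≤ i ∧ i < 2102) by omega),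
        if_neg (show ¬(2102 ≤ i ∧ i < 2800) by omega),
        if_neg (show ¬(2800 ≤ i ∧ i < 3500) by omega),
        if_neg (show ¬(3500 ≤ i ∧ i < 4200) by omega),
        if_neg (show ¬(4200 ≤ i ∧ i < 4798) by omega),
        if_neg (show ¬(4798 ≤ i ∧ i < 5597) by omega),
        if_neg (show ¬(5597 ≤ i ∧ i < 6301) by omega),
        if_neg (show ¬(6301 ≤ i ∧ i < 7006) by omega)]
  · simp only [pvStep]
    rw [if_neg (show ¬(0 ≤ i ∧ i < 701) by omega),
        if_neg (show ¬(701 ≤ i ∧ i < 1400) by omega),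
        if_pos (show (1400 ≤ i ∧ i < 2102) by omega),
        if_neg (show ¬(0 ≤ i ∧ i < 701) by omega),
        if_neg (show ¬(701 ≤ i ∧ i < 1400) by omega),
        if_pos (show (1400 ≤ i ∧ i < 2102) by omega),
        if_neg (show ¬(2102 ≤ i ∧ i < 2800) by omega),
        if_neg (show ¬(2800 ≤ i ∧ i < 3500) by omega),
        if_neg (show ¬(3500 ≤ i ∧ i < 4200) by omega),
        if_neg (show ¬(4200 ≤ i ∧ i < 4798) by omega),
        if_neg (show ¬(4798 ≤ i ∧ i < 5597) by omega),
        if_neg (show ¬(5597 ≤ i ∧ i < 6301) by omega),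
        if_neg (show ¬(6301 ≤ i ∧ i < 7006) by omega)]
  · simp only [pvStep]
    rw [if_neg (show ¬(0 ≤ i ∧ i < 701) by omega),
        if_neg (show ¬(701 ≤ i ∧ i < 1400) by omega),
        if_neg (show ¬(1400 ≤ i ∧ i < 2102) by omega),
        if_pos (show (2102 ≤ i ∧ i < 2800) by omega),
        if_neg (show ¬(0 ≤ i ∧ i < 701) by omega),
        if_neg (show ¬(701 ≤ i ∧ i < 1400) by omega),
        if_neg (show ¬(1400 ≤ i ∧ i < 2102) by omega),
        if_pos (show (2102 ≤ i ∧ i < 2800) by omega),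
        if_neg (show ¬(2800 ≤ i ∧ i < 3500) by omega),
        if_neg (show ¬(3500 ≤ i ∧ i < 4200) by omega),
        if_neg (show ¬(4200 ≤ i ∧ i < 4798) by omega),
        if_neg (show ¬(4798 ≤ i ∧ i < 5597) by omega),
        if_neg (show ¬(5597 ≤ i ∧ i < 6301) by omega),
        if_neg (show ¬(6301 ≤ i ∧ i < 7006) by omega)]
  · simp only [pvStep]
    rw [if_neg (show ¬(0 ≤ i ∧ i < 701) by omega),
        if_neg (show ¬(701 ≤ i ∧ i < 1400) by omega),
        if_neg (show ¬(1400 ≤ i ∧ i < 2102) by omega),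
        if_neg (show ¬(2102 ≤ i ∧ i < 2800) by omega),
        if_pos (show (2800 ≤ i ∧ i < 3500) by omega),
        if_neg (show ¬(0 ≤ i ∧ i < 701) by omega),
        if_neg (show ¬(701 ≤ i ∧ i < 1400) by omega),
        if_neg (show ¬(1400 ≤ i ∧ i < 2102) by omega),
        if_neg (show ¬(2102 ≤ i ∧ i < 2800) by omega),
        if_pos (show (2800 ≤ i ∧ i < 3500) by omega),
        if_neg (show ¬(3500 ≤ i ∧ i < 4200) by omega),
        if_neg (show ¬(4200 ≤ i ∧ i < 4798) by omega),
        if_neg (show ¬(4798 ≤ i ∧ i < 5597) by omega),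
        if_neg (show ¬(5597 ≤ i ∧ i < 6301) by omega),
        if_neg (show ¬(6301 ≤ i ∧ i < 7006) by omega)]
  · simp only [pvStep]
    rw [if_neg (show ¬(0 ≤ i ∧ i < 701) by omega),
        if_neg (show ¬(701 ≤ i ∧ i < 1400) by omega),
        if_neg (show ¬(1400 ≤ i ∧ i < 2102) by omega),
        if_neg (show ¬(2102 ≤ i ∧ i < 2800) by omega),
        if_neg (show ¬(2800 ≤ i ∧ i < 3500) by omega),
        if_pos (show (3500 ≤ i ∧ i < 4200) by omega),
        if_neg (show ¬(0 ≤ i ∧ i < 701) by omega),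
        if_neg (show ¬(701 ≤ i ∧ i < 1400) by omega),
        if_neg (show ¬(1400 ≤ i ∧ i < 2102) by omega),
        if_neg (show ¬(2102 ≤ i ∧ i < 2800) by omega),
        if_neg (show ¬(2800 ≤ i ∧ i < 3500) by omega),
        if_pos (show (3500 ≤ i ∧ i < 4200) by omega),
        if_neg (show ¬(4200 ≤ i ∧ i < 4798) by omega),
        if_neg (show ¬(4798 ≤ i ∧ i < 5597) by omega),
        if_neg (show ¬(5597 ≤ i ∧ i < 6301) by omega),
        if_neg (show ¬(6301 ≤ i ∧ i < 7006) by omega)]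
  · simp only [pvStep]
    rw [if_neg (show ¬(0 ≤ i ∧ i < 701) by omega),
        if_neg (show ¬(701 ≤ i ∧ i < 1400) by omega),
        if_neg (show ¬(1400 ≤ i ∧ i < 2102) by omega),
        if_neg (show ¬(2102 ≤ i ∧ i < 2800) by omega),
        if_neg (show ¬(2800 ≤ i ∧ i < 3500) by omega),
        if_neg (show ¬(3500 ≤ i ∧ i < 4200) by omega),
        if_pos (show (4200 ≤ i ∧ i < 4798) by omega),
        if_neg (show ¬(0 ≤ i ∧ i < 701) by omega),
        if_neg (show ¬(701 ≤ i ∧ i < 1400) by omega),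
        if_neg (show ¬(1400 ≤ i ∧ i < 2102) by omega),
        if_neg (show ¬(2102 ≤ i ∧ i < 2800) by omega),
        if_neg (show ¬(2800 ≤ i ∧ i < 3500) by omega),
        if_neg (show ¬(3500 ≤ i ∧ i < 4200) by omega),
        if_pos (show (4200 ≤ i ∧ i < 4798) by omega),
        if_neg (show ¬(4798 ≤ i ∧ i < 5597) by omega),
        if_neg (show ¬(5597 ≤ i ∧ i < 6301) by omega),
        if_neg (show ¬(6301 ≤ i ∧ i < 7006) by omega)]
  · simp only [pvStep]
    rw [if_neg (show ¬(0 ≤ i ∧ i < 701) by omega),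
        if_neg (show ¬(701 ≤ i ∧ i < 1400) by omega),
        if_neg (show ¬(1400 ≤ i ∧ i < 2102) by omega),
        if_neg (show ¬(2102 ≤ i ∧ i < 2800) by omega),
        if_neg (show ¬(2800 ≤ i ∧ i < 3500) by omega),
        if_neg (show ¬(3500 ≤ i ∧ i < 4200) by omega),
        if_neg (show ¬(4200 ≤ i ∧ i < 4798) by omega),
        if_pos (show (4798 ≤ i ∧ i < 5597) by omega),
        if_neg (show ¬(0 ≤ i ∧ i < 701) by omega),
        if_neg (show ¬(701 ≤ i ∧ i < 1400) by omega),
        if_neg (show ¬(1400 ≤ i ∧ i < 2102) by omega),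
        if_neg (show ¬(2102 ≤ i ∧ i < 2800) by omega),
        if_neg (show ¬(2800 ≤ i ∧ i < 3500) by omega),
        if_neg (show ¬(3500 ≤ i ∧ i < 4200) by omega),
        if_neg (show ¬(4200 ≤ i ∧ i < 4798) by omega),
        if_pos (show (4798 ≤ i ∧ i < 5597) by omega),
        if_neg (show ¬(5597 ≤ i ∧ i < 6301) by omega),
        if_neg (show ¬(6301 ≤ i ∧ i < 7006) by omega)]
  · simp only [pvStep]
    rw [if_neg (show ¬(0 ≤ i ∧ i < 701) by omega),
        if_neg (show ¬(701 ≤ i ∧ i < 1400) by omega),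
        if_neg (show ¬(1400 ≤ i ∧ i < 2102) by omega),
        if_neg (show ¬(2102 ≤ i ∧ i < 2800) by omega),
        if_neg (show ¬(2800 ≤ i ∧ i < 3500) by omega),
        if_neg (show ¬(3500 ≤ i ∧ i < 4200) by omega),
        if_neg (show ¬(4200 ≤ i ∧ i < 4798) by omega),
        if_neg (show ¬(4798 ≤ i ∧ i < 5597) by omega),
        if_pos (show (5597 ≤ i ∧ i < 6301) by omega),
        if_neg (show ¬(0 ≤ i ∧ i < 701) by omega),
        if_neg (show ¬(701 ≤ i ∧ i < 1400) by omega),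
        if_neg (show ¬(1400 ≤ i ∧ i < 2102) by omega),
        if_neg (show ¬(2102 ≤ i ∧ i < 2800) by omega),
        if_neg (show ¬(2800 ≤ i ∧ i < 3500) by omega),
        if_neg (show ¬(3500 ≤ i ∧ i < 4200) by omega),
        if_neg (show ¬(4200 ≤ i ∧ i < 4798) by omega),
        if_neg (show ¬(4798 ≤ i ∧ i < 5597) by omega),
        if_pos (show (5597 ≤ i ∧ i < 6301) by omega),
        if_neg (show ¬(6301 ≤ i ∧ i < 7006) by omega)]
  · simp only [pvStep]
    rw [if_neg (show ¬(0 ≤ i ∧ i < 701) by omega),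
        if_neg (show ¬(701 ≤ i ∧ i < 1400) by omega),
        if_neg (show ¬(1400 ≤ i ∧ i < 2102) by omega),
        if_neg (show ¬(2102 ≤ i ∧ i < 2800) by omega),
        if_neg (show ¬(2800 ≤ i ∧ i < 3500) by omega),
        if_neg (show ¬(3500 ≤ i ∧ i < 4200) by omega),
        if_neg (show ¬(4200 ≤ i ∧ i < 4798) by omega),
        if_neg (show ¬(4798 ≤ i ∧ i < 5597) by omega),
        if_neg (show ¬(5597 ≤ i ∧ i < 6301) by omega),
        if_pos (show (6301 ≤ i ∧ i < 7006) by omega),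
        if_neg (show ¬(0 ≤ i ∧ i < 701) by omega),
        if_neg (show ¬(701 ≤ i ∧ i < 1400) by omega),
        if_neg (show ¬(1400 ≤ i ∧ i < 2102) by omega),
        if_neg (show ¬(2102 ≤ i ∧ i < 2800) by omega),
        if_neg (show ¬(2800 ≤ i ∧ i < 3500) by omega),
        if_neg (show ¬(3500 ≤ i ∧ i < 4200) by omega),
        if_neg (show ¬(4200 ≤ i ∧ i < 4798) by omega),
        if_neg (show ¬(4798 ≤ i ∧ i < 5597) by omega),
        if_neg (show ¬(5597 ≤ i ∧ i < 6301) by omega),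
        if_pos (show (6301 ≤ i ∧ i < 7006) by omega)]
  · simp only [pvStep]
    rw [if_neg (show ¬(0 ≤ i ∧ i < 701) by omega),
        if_neg (show ¬(701 ≤ i ∧ i < 1400) by omega),
        if_neg (show ¬(1400 ≤ i ∧ i < 2102) by omega),
        if_neg (show ¬(2102 ≤ i ∧ i < 2800) by omega),
        if_neg (show ¬(2800 ≤ i ∧ i < 3500) by omega),
        if_neg (show ¬(3500 ≤ i ∧ i < 4200) by omega),
        if_neg (show ¬(4200 ≤ i ∧ i < 4798) by omega),
        if_neg (show ¬(4798 ≤ i ∧ i < 5597) by omega),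
        if_neg (show ¬(5597 ≤ i ∧ i < 6301) by omega),
        if_neg (show ¬(6301 ≤ i ∧ i < 7006) by omega),
        if_neg (show ¬(0 ≤ i ∧ i < 701) by omega),
        if_neg (show ¬(701 ≤ i ∧ i < 1400) by omega),
        if_neg (show ¬(1400 ≤ i ∧ i < 2102) by omega),
        if_neg (show ¬(2102 ≤ i ∧ i < 2800) by omega),
        if_neg (show ¬(2800 ≤ i ∧ i < 3500) by omega),
        if_neg (show ¬(3500 ≤ i ∧ i < 4200) by omega),
        if_neg (show ¬(4200 ≤ i ∧ i < 4798) by omega),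
        if_neg (show ¬(4798 ≤ i ∧ i < 5597) by omega),
        if_neg (show ¬(5597 ≤ i ∧ i < 6301) by omega),
        if_neg (show ¬(6301 ≤ i ∧ i < 7006) by omega)]

set_option maxHeartbeats 1000000 in
theorem pvMain (n : Nat) :
    (PySem.List.pyRange 0 (n : Int) 1).foldl pvStep
      (([], [], [], [], [], [], [], [], [], []) : pvSt) = (pvBk 0 701 n, pvBk 701 1400 n, pvBk 1400 2102 n, pvBk 2102 2800 n, pvBk 2800 3500 n, pvBk 3500 4200 n, pvBk 4200 4798 n, pvBk 4798 5597 n, pvBk 5597 6301 n, pvBk 6301 7006 n) := by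
  induction n with
  | zero =>
    rw [PySem.List.pyRange_one_eq_nil (by omega)]
    simp only [List.foldl_nil]
    simp only [pvBk_zero 0 701 (by omega : (0:Int) ≤ 0), pvBk_zero 701 1400 (by omega : (0:Int) ≤ 701), pvBk_zero 1400 2102 (by omega : (0:Int) ≤ 1400), pvBk_zero 2102 2800 (by omega : (0:Int) ≤ 2102), pvBk_zero 2800 3500 (by omega : (0:Int) ≤ 2800), pvBk_zero 3500 4200 (by omega : (0:Int) ≤ 3500), pvBk_zero 4200 4798 (by omega : (0:Int) ≤ 4200), pvBk_zero 4798 5597 (by omega : (0:Int) ≤ 4798), pvBk_zero 5597 6301 (by omega : (0:Int) ≤ 5597), pvBk_zero 6301 7006 (by omega : (0:Int) ≤ 6301)]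
  | succ n ih =>
    have hsr : (PySem.List.pyRange 0 ((n : Int) + 1) 1) = PySem.List.pyRange 0 (n : Int) 1 ++ [(n : Int)] :=
      PySem.List.pyRange_one_succ_right (by omega)
    push_cast
    rw [hsr, List.foldl_append, List.foldl_cons, List.foldl_nil, ih, pvStep_eq,
      pvBk_succ 0 701 n,
      pvBk_succ 701 1400 n,
      pvBk_succ 1400 2102 n,
      pvBk_succ 2102 2800 n,
      pvBk_succ 2800 3500 n,
      pvBk_succ 3500 4200 n,
      pvBk_succ 4200 4798 n,
      pvBk_succ 4798 5597 n,
      pvBk_succ 5597 6301 n,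
      pvBk_succ 6301 7006 n]

theorem pvAlt_eq (x_text : List Int) :
    cv_sorted_data_alt x_text =
      [pvBk 0 701 x_text.length, pvBk 701 1400 x_text.length, pvBk 1400 2102 x_text.length, pvBk 2102 2800 x_text.length, pvBk 2800 3500 x_text.length, pvBk 3500 4200 x_text.length, pvBk 4200 4798 x_text.length, pvBk 4798 5597 x_text.length, pvBk 5597 6301 x_text.length, pvBk 6301 7006 x_text.length] := by
  unfold cv_sorted_data_alt pvBk
  have h10 : PySem.List.pyRange 0 10 1 = [0, 1, 2, 3, 4, 5, 6, 7, 8, 9] := by decide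
  have g0 : PySem.List.pyGetD pvBounds 0 0 = 0 := by decide
  have g1 : PySem.List.pyGetD pvBounds 1 0 = 701 := by decide
  have g2 : PySem.List.pyGetD pvBounds 2 0 = 1400 := by decide
  have g3 : PySem.List.pyGetD pvBounds 3 0 = 2102 := by decide
  have g4 : PySem.List.pyGetD pvBounds 4 0 = 2800 := by decide
  have g5 : PySem.List.pyGetD pvBounds 5 0 = 3500 := by decide
  have g6 : PySem.List.pyGetD pvBounds 6 0 = 4200 := by decide
  have g7 : PySem.List.pyGetD pvBounds 7 0 = 4798 := by decide
  have g8 : PySem.List.pyGetD pvBounds 8 0 = 5597 := by decide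
  have g9 : PySem.List.pyGetD pvBounds 9 0 = 6301 := by decide
  have g10 : PySem.List.pyGetD pvBounds 10 0 = 7006 := by decide
  rw [h10]
  simp only [List.map]
  norm_num [g0, g1, g2, g3, g4, g5, g6, g7, g8, g9, g10]

-- ===== VERDICT (by name: the statement is the Claim_ definition above) =====
theorem cv_sorted_data_spec : Claim_equal_cv_sorted_data := by
  intro x_text _
  unfold Spec_cv_sorted_data
  rw [pvAlt_eq]
  unfold cv_sorted_data
  rw [pvMain x_text.length]
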